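-- pv_equiv track=rewrite | github.com/levinkurian00/career-decision-companion | backend/decision_engine.py | generate_comparison_explanation
-- ===== SOURCE A (Python) =====
-- def generate_comparison_explanation(top_career, second_career, weights):
--     """
--     Compare top two careers and explain why second ranked lower.
--     """
--
--     top_contrib = top_career["contributions"]
--     second_contrib = second_career["contributions"]
--
--     differences = {}
--
--     for criterion in top_contrib:
--         differences[criterion] = top_contrib[criterion] - second_contrib.get(criterion, 0)
--
--     # Sort by largest difference
--     sorted_diff = sorted(
--         differences.items(),
--         key=lambda x: x[1],
--         reverse=True
--     )
--
--     # Take top 2 differentiators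
--     top_reasons = [crit for crit, val in sorted_diff[:2] if val > 0]
--
--     if not top_reasons:
--         return "The top two careers performed very similarly across most criteria."
--
--     return (
--         f"The second-ranked career scored lower mainly due to weaker performance in "
--         f"{' and '.join(top_reasons)} compared to the top-ranked option."
--     )
-- ===== SOURCE B (Python) =====
-- def generate_comparison_explanation(top_career, second_career, weights):
--     """
--     Compare top two careers and explain why second ranked lower.
--     Single linear pass keeping the top-2 (criterion, diff) pairs; no dict, no sort.
--     """
--     second_contrib = second_career["contributions"]
--
--     top2 = []
--     for crit, val in top_career["contributions"].items():
--         d = val - second_contrib.get(crit, 0)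
--         if not top2:
--             top2 = [(crit, d)]
--         elif d > top2[0][1]:
--             top2 = [(crit, d), top2[0]]
--         elif len(top2) == 1 or d > top2[1][1]:
--             top2 = [top2[0], (crit, d)]
--
--     reasons = [crit for crit, d in top2 if d > 0]
--     if not reasons:
--         return "The top two careers performed very similarly across most criteria."
--     return (
--         "The second-ranked career scored lower mainly due to weaker performance in "
--         + " and ".join(reasons)
--         + " compared to the top-ranked option."
--     )
-- ===== Notes on version B (the rewrite author's own statement) =====
-- stated objective: alternative
-- what changed: B replaces building a differences dict, sorting all items descending and slicing the top two by a single linear pass that maintains the best and second-best (criterion, diff) pairs (stable tie-breaking by iteration order), then filters and formats the same sentence.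
-- outside the precondition, e.g. on generate_comparison_explanation({}, {'contributions': {}}, {}): A raises KeyError, B raises KeyError
import Mathlib
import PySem

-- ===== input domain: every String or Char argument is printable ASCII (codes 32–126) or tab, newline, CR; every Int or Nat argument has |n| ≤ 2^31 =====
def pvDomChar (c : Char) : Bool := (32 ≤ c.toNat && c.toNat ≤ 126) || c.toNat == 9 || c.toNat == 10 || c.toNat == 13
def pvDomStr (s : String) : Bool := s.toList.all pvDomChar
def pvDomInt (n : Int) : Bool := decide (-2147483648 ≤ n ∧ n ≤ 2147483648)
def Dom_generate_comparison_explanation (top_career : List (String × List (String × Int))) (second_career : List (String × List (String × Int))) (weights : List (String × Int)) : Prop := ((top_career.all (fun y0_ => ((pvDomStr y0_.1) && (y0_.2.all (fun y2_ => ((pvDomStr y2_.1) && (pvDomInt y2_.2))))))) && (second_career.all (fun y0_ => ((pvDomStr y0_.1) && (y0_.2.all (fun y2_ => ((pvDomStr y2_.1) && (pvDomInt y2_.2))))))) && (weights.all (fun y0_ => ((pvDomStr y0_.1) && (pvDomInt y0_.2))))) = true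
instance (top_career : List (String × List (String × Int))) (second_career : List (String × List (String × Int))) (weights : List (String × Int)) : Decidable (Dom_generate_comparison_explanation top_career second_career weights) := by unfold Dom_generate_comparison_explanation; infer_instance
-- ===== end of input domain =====

-- B replaces the sort-then-slice by a single linear pass keeping the top-2 (criterion, diff)
-- pairs (no differences dict, no sort); same sentence. Equivalence is proved on Pre_ (the
-- "contributions" key present in both careers; A raises KeyError otherwise).

-- ===== PORT A =====
def generate_comparison_explanation (top_career : List (String × List (String × Int))) (second_career : List (String × List (String × Int))) (weights : List (String × Int)) : String :=
  -- top_career["contributions"]: KeyError when absent is excluded by Pre_ (getD [] there)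
  let top_contrib := PySem.Dict.ofList ((PySem.Dict.ofList top_career).getD "contributions" [])
  let second_contrib := PySem.Dict.ofList ((PySem.Dict.ofList second_career).getD "contributions" [])
  -- for criterion in top_contrib: differences[criterion] = top_contrib[criterion] - second_contrib.get(criterion, 0)
  -- (top_contrib[criterion] is ported as getD with default 0: the key is always present, so this is exact)
  let differences := top_contrib.keys.foldl
    (fun d criterion => d.insert criterion (top_contrib.getD criterion 0 - second_contrib.getD criterion 0))
    PySem.Dict.empty
  let sorted_diff := PySem.List.sorted differences.items (fun x => x.2) true
  -- sorted_diff[:2] is List.take 2 (nonnegative literal slice)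
  let top_reasons := ((sorted_diff.take 2).filter (fun p => decide (0 < p.2))).map (fun p => p.1)
  if top_reasons = [] then
    "The top two careers performed very similarly across most criteria."
  else
    "The second-ranked career scored lower mainly due to weaker performance in " ++ PySem.Str.join " and " top_reasons ++ " compared to the top-ranked option."

-- ===== PORT B =====
-- one step of B's linear top-2 scan (t is the current top-2 list, length ≤ 2)
def altStep (t : List (String × Int)) (p : String × Int) : List (String × Int) :=
  match t with
  | [] => [p]
  | a :: rest =>
    if a.2 < p.2 then [p, a]
    else
      match rest with
      | [] => [a, p]
      | b :: _ => if b.2 < p.2 then [a, p] else t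

def generate_comparison_explanation_alt (top_career : List (String × List (String × Int))) (second_career : List (String × List (String × Int))) (weights : List (String × Int)) : String :=
  let second_contrib := PySem.Dict.ofList ((PySem.Dict.ofList second_career).getD "contributions" [])
  let top2 := (PySem.Dict.ofList ((PySem.Dict.ofList top_career).getD "contributions" [])).items.foldl
    (fun t p => altStep t (p.1, p.2 - second_contrib.getD p.1 0)) []
  let reasons := (top2.filter (fun p => decide (0 < p.2))).map (fun p => p.1)
  if reasons = [] then
    "The top two careers performed very similarly across most criteria."
  else
    "The second-ranked career scored lower mainly due to weaker performance in " ++ PySem.Str.join " and " reasons ++ " compared to the top-ranked option."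

-- ===== PRECONDITION & SPEC =====
-- Pre_ excludes exactly the inputs where A raises KeyError: a career dict without the "contributions" key.
def Pre_generate_comparison_explanation (top_career : List (String × List (String × Int))) (second_career : List (String × List (String × Int))) (weights : List (String × Int)) : Prop :=
  (PySem.Dict.ofList top_career).contains "contributions" = true ∧
  (PySem.Dict.ofList second_career).contains "contributions" = true
instance (top_career : List (String × List (String × Int))) (second_career : List (String × List (String × Int))) (weights : List (String × Int)) : Decidable (Pre_generate_comparison_explanation top_career second_career weights) := by unfold Pre_generate_comparison_explanation; infer_instance

def pvWitness_generate_comparison_explanation : (List (String × List (String × Int))) × (List (String × List (String × Int))) × (List (String × Int)) :=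
  ([("contributions", [("salary", 5), ("growth", 2)])], [("contributions", [("salary", 1)])], [("salary", 1)])

def Spec_generate_comparison_explanation (top_career : List (String × List (String × Int))) (second_career : List (String × List (String × Int))) (weights : List (String × Int)) (out : String) : Prop := out = generate_comparison_explanation_alt top_career second_career weights
instance (top_career : List (String × List (String × Int))) (second_career : List (String × List (String × Int))) (weights : List (String × Int)) (out : String) : Decidable (Spec_generate_comparison_explanation top_career second_career weights out) := by unfold Spec_generate_comparison_explanation; infer_instance

-- ===== CLAIM (what is proved, stated in full; the proofs are below) =====
def Claim_equal_generate_comparison_explanation : Prop := ∀ (top_career : List (String × List (String × Int))) (second_career : List (String × List (String × Int))) (weights : List (String × Int)), Dom_generate_comparison_explanation top_career second_career weights → Pre_generate_comparison_explanation top_career second_career weights → Spec_generate_comparison_explanation top_career second_career weights (generate_comparison_explanation top_career second_career weights)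

-- ===== LEMMAS AND PROOFS =====

-- the first two elements of an insertion step depend only on the first two of the accumulator
lemma take2_insertBy (x : String × Int) (acc : List (String × Int)) :
    (PySem.List.insertBy (fun a b => decide (b.2 < a.2)) x acc).take 2 = altStep (acc.take 2) x := by
  match acc with
  | [] => rfl
  | [a] =>
    simp only [PySem.List.insertBy, altStep, decide_eq_true_eq]
    by_cases h : a.2 < x.2 <;> simp [h]
  | a :: b :: rest =>
    simp only [PySem.List.insertBy, altStep, decide_eq_true_eq]
    by_cases h1 : a.2 < x.2
    · simp [h1]
    · by_cases h2 : b.2 < x.2 <;> simp [h1, h2]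

lemma foldl_take2 (ds : List (String × Int)) (acc : List (String × Int)) :
    (List.foldl (fun acc x => PySem.List.insertBy (fun a b => decide (b.2 < a.2)) x acc) acc ds).take 2
      = List.foldl altStep (acc.take 2) ds := by
  induction ds generalizing acc with
  | nil => rfl
  | cons x ds ih =>
    simp only [List.foldl_cons]
    rw [ih, take2_insertBy]

-- top-2 of the stable descending sort = B's linear scan
lemma take2_sorted (ds : List (String × Int)) :
    (PySem.List.sorted ds (fun p => p.2) true).take 2 = List.foldl altStep [] ds := by
  rw [PySem.List.sorted_rev_eq_foldl_insertBy ds (fun p => p.2)]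
  exact foldl_take2 ds []

-- A's differences dict has exactly the items B scans over
lemma core (tcl scl : List (String × Int)) :
    (PySem.List.sorted
        ((PySem.Dict.ofList tcl).keys.foldl
          (fun d k => d.insert k ((PySem.Dict.ofList tcl).getD k 0 - (PySem.Dict.ofList scl).getD k 0))
          PySem.Dict.empty).items (fun x => x.2) true).take 2
      = (PySem.Dict.ofList tcl).items.foldl
          (fun t p => altStep t (p.1, p.2 - (PySem.Dict.ofList scl).getD p.1 0)) [] := by
  have hnd : (PySem.Dict.ofList tcl).keys.Nodup := PySem.Dict.nodup_keys_ofList tcl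
  have h1 : ((PySem.Dict.ofList tcl).keys.foldl
        (fun d k => d.insert k ((PySem.Dict.ofList tcl).getD k 0 - (PySem.Dict.ofList scl).getD k 0))
        PySem.Dict.empty).items
      = (PySem.Dict.ofList tcl).keys.map
          (fun k => (k, (PySem.Dict.ofList tcl).getD k 0 - (PySem.Dict.ofList scl).getD k 0)) := by
    have := PySem.Dict.items_foldl_insert_fresh (PySem.Dict.ofList tcl).keys (fun k => k)
      (fun k => (PySem.Dict.ofList tcl).getD k 0 - (PySem.Dict.ofList scl).getD k 0)
      PySem.Dict.empty (fun a _ => PySem.Dict.contains_empty a) (by simp only [List.map_id_fun', id]; exact hnd)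
    simpa using this
  have h2 : (PySem.Dict.ofList tcl).items
      = (PySem.Dict.ofList tcl).keys.map (fun k => (k, (PySem.Dict.ofList tcl).getD k 0)) :=
    PySem.Dict.items_eq_map_keys _ hnd 0
  rw [h1, take2_sorted, h2]
  simp only [List.foldl_map]

theorem generate_comparison_explanation_spec : Claim_equal_generate_comparison_explanation := by
  intro top_career second_career weights _hdom _hpre
  unfold Spec_generate_comparison_explanation
  simp only [generate_comparison_explanation, generate_comparison_explanation_alt, core]
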